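-- pv_equiv track=rewrite | github.com/Hulyamr13/hackerrank | Chocolate Game.py | chocolateGame
-- ===== SOURCE A (Python) =====
-- from collections import defaultdict
--
-- def chocolateGame(arr):
--     prefixes = (defaultdict(int), defaultdict(int))
--     iter_arr = iter(arr)
--     loses = 0
--     prev = next(iter_arr)
--     curr_xor = [prev, 0]
--     it = 1
--     prefixes[0][0] = 1
--     prefixes[1][0] = 1
--     prefixes[0][prev] = 1
--
--     for i in iter_arr:
--         curr_xor[it] ^= (i - prev)
--         loses += prefixes[it][curr_xor[it]]
--         prefixes[it][curr_xor[it]] += 1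
--         prefixes[it][curr_xor[it] ^ i] += 1
--         it = not it
--         prev = i
--
--     n = len(arr)
--     return n * (n - 1) // 2 - loses
-- ===== SOURCE B (Python) =====
-- def chocolateGame(arr):
--     n = len(arr)
--     first = arr[0]
--     # stage 1: split into per-parity event lists of (query value, element),
--     # query values = running xor of same-parity differences (parity 0 seeded with first)
--     ev = ([], [])
--     x = [first, 0]
--     prev = first
--     for j, a in enumerate(arr[1:]):
--         t = 1 - j % 2
--         x[t] ^= a - prev
--         ev[t].append((x[t], a))
--         prev = a
--     # stage 2: offline matching, no counter: each query is matched against the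
--     # initial key set and the two keys contributed by every earlier same-parity event
--     inits = ({0, first}, {0})
--     loses = sum((q in inits[t])
--                 + sum((v == q) + ((v ^ a) == q) for v, a in ev[t][:k])
--                 for t in (0, 1)
--                 for k, (q, _) in enumerate(ev[t]))
--     return n * (n - 1) // 2 - loses
-- ===== Notes on version B (the rewrite author's own statement) =====
-- stated objective: alternative
-- what changed: The online hash-map counter (query-before-insert into two defaultdicts inside one interleaved loop) is removed entirely: B first splits the array into two per-parity event lists of (prefix-xor query, element), then counts losses OFFLINE by matching each query against the initial key set and the two keys contributed by every earlier same-parity event via nested sums - pair enumeration instead of incremental hash counting.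
-- outside the precondition, e.g. on chocolateGame([]): A raises StopIteration, B raises IndexError
import Mathlib
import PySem

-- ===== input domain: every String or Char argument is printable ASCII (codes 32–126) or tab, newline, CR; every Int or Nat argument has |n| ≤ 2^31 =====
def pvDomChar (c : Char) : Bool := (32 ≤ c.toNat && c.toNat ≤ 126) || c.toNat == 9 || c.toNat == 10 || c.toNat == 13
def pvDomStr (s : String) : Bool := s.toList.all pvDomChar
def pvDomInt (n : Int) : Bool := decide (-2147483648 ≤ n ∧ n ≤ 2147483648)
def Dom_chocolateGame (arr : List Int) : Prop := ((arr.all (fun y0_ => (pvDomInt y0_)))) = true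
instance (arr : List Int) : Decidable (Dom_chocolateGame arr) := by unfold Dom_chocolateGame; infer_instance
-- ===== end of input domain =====

-- B removes A's online defaultdict counter: it splits the array into per-parity event lists and
-- counts losses offline by nested pair matching (objective: alternative; not faster).

-- ===== PORT A =====
-- A's loop body: state = (prefixes0, prefixes1, curr_xor0, curr_xor1, it, prev, loses)
def chocStepA (s : PySem.Dict Int Int × PySem.Dict Int Int × Int × Int × Bool × Int × Int)
    (i : Int) : PySem.Dict Int Int × PySem.Dict Int Int × Int × Int × Bool × Int × Int :=
  let (p0, p1, x0, x1, it, prev, loses) := s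
  if it then
    let x1 := PySem.Int.bxor x1 (i - prev)
    let loses := loses + p1.getD x1 0
    let p1 := p1.modify x1 0 (· + 1)
    let p1 := p1.modify (PySem.Int.bxor x1 i) 0 (· + 1)
    (p0, p1, x0, x1, false, i, loses)
  else
    let x0 := PySem.Int.bxor x0 (i - prev)
    let loses := loses + p0.getD x0 0
    let p0 := p0.modify x0 0 (· + 1)
    let p0 := p0.modify (PySem.Int.bxor x0 i) 0 (· + 1)
    (p0, p1, x0, x1, true, i, loses)

def chocolateGame (arr : List Int) : Int :=
  match arr with
  | [] => 0  -- unreachable: Python raises StopIteration here; Pre_ excludes []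
  | prev :: rest =>
    let p0 : PySem.Dict Int Int := (PySem.Dict.empty.insert 0 1).insert prev 1
    let p1 : PySem.Dict Int Int := PySem.Dict.empty.insert 0 1
    let st := rest.foldl chocStepA (p0, p1, prev, 0, true, prev, 0)
    let loses := st.2.2.2.2.2.2
    let n : Int := arr.length
    PySem.Int.floordiv (n * (n - 1)) 2 - loses

-- ===== PORT B =====
-- stage-1 body: state = (ev0, ev1, x0, x1, prev); input = (j, a) from enumerate(arr[1:])
def chocPhase1B (s : List (Int × Int) × List (Int × Int) × Int × Int × Int)
    (ja : Int × Int) : List (Int × Int) × List (Int × Int) × Int × Int × Int :=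
  let (e0, e1, x0, x1, prev) := s
  if PySem.Int.mod ja.1 2 == 0 then  -- t = 1 - j % 2 = 1
    let x1 := PySem.Int.bxor x1 (ja.2 - prev)
    (e0, e1 ++ [(x1, ja.2)], x0, x1, ja.2)
  else                               -- t = 0
    let x0 := PySem.Int.bxor x0 (ja.2 - prev)
    (e0 ++ [(x0, ja.2)], e1, x0, x1, ja.2)

-- stage-2: offline matching of each query against the initial key set and all earlier events
def chocMatchB (init : PySem.Set Int) (ev : List (Int × Int)) : Int :=
  (PySem.List.enumerate ev 0).foldl
    (fun acc kq =>
      acc + (if PySem.Set.contains init kq.2.1 then (1 : Int) else 0)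
          + (PySem.List.slice ev none (some kq.1)).foldl
              (fun s va => s + (if va.1 == kq.2.1 then (1 : Int) else 0)
                             + (if PySem.Int.bxor va.1 va.2 == kq.2.1 then (1 : Int) else 0)) 0) 0

def chocolateGame_alt (arr : List Int) : Int :=
  match arr with
  | [] => 0  -- unreachable: Python raises IndexError here; Pre_ excludes []
  | first :: _ =>
    let ph := (PySem.List.enumerate (PySem.List.slice arr (some 1) none) 0).foldl
                chocPhase1B ([], [], first, 0, first)
    let loses := chocMatchB (PySem.Set.ofList [0, first]) ph.1
               + chocMatchB (PySem.Set.ofList [0]) ph.2.1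
    let n : Int := arr.length
    PySem.Int.floordiv (n * (n - 1)) 2 - loses

-- ===== PRECONDITION & SPEC =====
-- Pre_ excludes only the empty list, on which A raises StopIteration (B raises IndexError).
def Pre_chocolateGame (arr : List Int) : Prop := arr ≠ []
instance (arr : List Int) : Decidable (Pre_chocolateGame arr) := by unfold Pre_chocolateGame; infer_instance
def pvWitness_chocolateGame : List Int := [1, 2, 3]

def Spec_chocolateGame (arr : List Int) (out : Int) : Prop := out = chocolateGame_alt arr
instance (arr : List Int) (out : Int) : Decidable (Spec_chocolateGame arr out) := by unfold Spec_chocolateGame; infer_instance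

-- ===== CLAIM (what is proved, stated in full; the proofs are below) =====
def Claim_equal_chocolateGame : Prop := ∀ (arr : List Int), Dom_chocolateGame arr → Pre_chocolateGame arr → Spec_chocolateGame arr (chocolateGame arr)

-- ===== LEMMAS AND PROOFS =====

-- proof-side intermediate: A's loop reorganised as per-parity streams + an online count fold
def chocPhase1Step (s : List (Int × Int) × List (Int × Int) × Int × Int × Bool)
    (pr : Int × Int) : List (Int × Int) × List (Int × Int) × Int × Int × Bool :=
  let (s0, s1, x0, x1, p) := s
  if p then
    let x1 := PySem.Int.bxor x1 (pr.2 - pr.1)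
    (s0, s1 ++ [(x1, pr.2)], x0, x1, false)
  else
    let x0 := PySem.Int.bxor x0 (pr.2 - pr.1)
    (s0 ++ [(x0, pr.2)], s1, x0, x1, true)

def chocCountStep (s : Int × PySem.Dict Int Int) (e : Int × Int) : Int × PySem.Dict Int Int :=
  let (loses, cnt) := s
  let loses := loses + cnt.getD e.1 0
  let cnt := cnt.modify e.1 0 (· + 1)
  let cnt := cnt.modify (PySem.Int.bxor e.1 e.2) 0 (· + 1)
  (loses, cnt)

-- the two keys an event inserts
def chocKeys (es : List (Int × Int)) : List Int :=
  es.flatMap (fun e => [e.1, PySem.Int.bxor e.1 e.2])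

-- the count fold is affine in the initial loses
lemma count_shift (es : List (Int × Int)) : ∀ (l c : Int) (d : PySem.Dict Int Int),
    es.foldl chocCountStep (l + c, d)
      = ((es.foldl chocCountStep (l, d)).1 + c, (es.foldl chocCountStep (l, d)).2) := by
  induction es with
  | nil => intro l c d; simp
  | cons e es ih =>
    intro l c d
    simp only [List.foldl_cons, chocCountStep]
    rw [show l + c + (d.getD e.1 0) = (l + d.getD e.1 0) + c by ring, ih]

-- phase 1 with accumulated streams = accumulators ++ phase 1 from empty streams
lemma phase1_acc (L : List (Int × Int)) : ∀ (s0 s1 : List (Int × Int)) (x0 x1 : Int) (p : Bool),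
    L.foldl chocPhase1Step (s0, s1, x0, x1, p)
      = ((s0 ++ (L.foldl chocPhase1Step ([], [], x0, x1, p)).1,
          s1 ++ (L.foldl chocPhase1Step ([], [], x0, x1, p)).2.1,
          (L.foldl chocPhase1Step ([], [], x0, x1, p)).2.2)) := by
  induction L with
  | nil => intro s0 s1 x0 x1 p; simp
  | cons e L ih =>
    intro s0 s1 x0 x1 p
    simp only [List.foldl_cons, chocPhase1Step]
    by_cases hp : p = true
    · subst hp
      simp only [reduceIte, List.nil_append]
      rw [ih, ih [] [(_, e.2)]]
      simp
    · replace hp : p = false := by cases p <;> simp_all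
      subst hp
      simp only [Bool.false_eq_true, reduceIte, List.nil_append]
      rw [ih, ih [(_, e.2)] []]
      simp

-- simulation: A's interleaved fold computes the two-phase per-parity count
lemma simA (rest : List Int) : ∀ (prev x0 x1 : Int) (it : Bool)
    (p0 p1 : PySem.Dict Int Int) (loses : Int),
    (rest.foldl chocStepA (p0, p1, x0, x1, it, prev, loses)).2.2.2.2.2.2
      = (let ph := ((prev :: rest).zip rest).foldl chocPhase1Step ([], [], x0, x1, it)
         (ph.2.1.foldl chocCountStep ((ph.1.foldl chocCountStep (loses, p0)).1, p1)).1) := by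
  induction rest with
  | nil => intro prev x0 x1 it p0 p1 loses; simp
  | cons i rest ih =>
    intro prev x0 x1 it p0 p1 loses
    by_cases hit : it = true
    · subst hit
      simp only [List.foldl_cons, chocStepA, List.zip_cons_cons, chocPhase1Step, reduceIte]
      rw [ih]
      simp only [List.nil_append]
      rw [phase1_acc _ [] [(_, i)]]
      simp only [List.nil_append, List.cons_append, List.foldl_cons, chocCountStep]
      rw [count_shift]
    · replace hit : it = false := by cases it <;> simp_all
      subst hit
      simp only [List.foldl_cons, chocStepA, Bool.false_eq_true, List.zip_cons_cons,
        chocPhase1Step, reduceIte]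
      rw [ih]
      simp only [List.nil_append]
      rw [phase1_acc _ [(_, i)] []]
      simp only [List.nil_append, List.cons_append, List.foldl_cons, chocCountStep]

-- accumulator lemma for B's phase-1 fold
lemma phase1B_acc (L : List (Int × Int)) : ∀ (e0 e1 : List (Int × Int)) (x0 x1 prev : Int),
    L.foldl chocPhase1B (e0, e1, x0, x1, prev)
      = ((e0 ++ (L.foldl chocPhase1B ([], [], x0, x1, prev)).1,
          e1 ++ (L.foldl chocPhase1B ([], [], x0, x1, prev)).2.1,
          (L.foldl chocPhase1B ([], [], x0, x1, prev)).2.2)) := by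
  induction L with
  | nil => intro e0 e1 x0 x1 prev; simp
  | cons e L ih =>
    intro e0 e1 x0 x1 prev
    simp only [List.foldl_cons, chocPhase1B]
    by_cases hp : (PySem.Int.mod e.1 2 == 0) = true
    · simp only [hp, reduceIte, List.nil_append]
      rw [ih, ih [] [(_, e.2)]]
      simp
    · simp only [hp, Bool.false_eq_true, reduceIte, List.nil_append]
      rw [ih, ih [(_, e.2)] []]
      simp

-- bridge: B's enumerate-indexed phase 1 produces the same per-parity streams as the
-- boolean-toggle phase 1 (parity bit = "index even")
lemma bridgeB (rest : List Int) : ∀ (s : Nat) (prev x0 x1 : Int),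
    ((PySem.List.enumerate rest (s : Int)).foldl chocPhase1B ([], [], x0, x1, prev)).1
      = (((prev :: rest).zip rest).foldl chocPhase1Step ([], [], x0, x1, decide (s % 2 = 0))).1
    ∧ ((PySem.List.enumerate rest (s : Int)).foldl chocPhase1B ([], [], x0, x1, prev)).2.1
      = (((prev :: rest).zip rest).foldl chocPhase1Step ([], [], x0, x1, decide (s % 2 = 0))).2.1 := by
  induction rest with
  | nil => intro s prev x0 x1; exact ⟨rfl, rfl⟩
  | cons a rest ih =>
    intro s prev x0 x1
    rw [PySem.List.enumerate_cons]
    simp only [List.foldl_cons, List.zip_cons_cons, chocPhase1B, chocPhase1Step]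
    have hmod : (PySem.Int.mod (s : Int) 2 == 0) = decide (s % 2 = 0) := by
      rw [PySem.Int.mod_eq_emod_of_pos (by norm_num)]
      by_cases h : s % 2 = 0
      · have h' : (s : Int) % 2 = 0 := by omega
        simp [h, h']
      · have h' : ¬ ((s : Int) % 2 = 0) := by omega
        simp [h, h']
    rw [hmod]
    by_cases hs : s % 2 = 0
    · simp only [hs, decide_true, reduceIte, List.nil_append]
      rw [phase1B_acc, phase1_acc]
      have := ih (s + 1) a x0 (PySem.Int.bxor x1 (a - prev))
      have hp : decide ((s + 1) % 2 = 0) = false := by simp; omega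
      rw [hp] at this
      push_cast at this
      simp [this.1, this.2]
    · simp only [hs, decide_false, Bool.false_eq_true, reduceIte, List.nil_append]
      rw [phase1B_acc, phase1_acc]
      have := ih (s + 1) a (PySem.Int.bxor x0 (a - prev)) x1
      have hp : decide ((s + 1) % 2 = 0) = true := by simp; omega
      rw [hp] at this
      push_cast at this
      simp [this.1, this.2]

-- dict component of the count fold = modify-add fold over the flattened inserted keys
lemma count_dict (es : List (Int × Int)) : ∀ (L : Int) (d : PySem.Dict Int Int),
    (es.foldl chocCountStep (L, d)).2
      = (chocKeys es).foldl (fun d k => d.modify k 0 (· + 1)) d := by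
  induction es with
  | nil => intro L d; simp [chocKeys]
  | cons e es ih =>
    intro L d
    simp only [List.foldl_cons, chocCountStep, chocKeys, List.flatMap_cons, List.foldl_append,
      List.foldl_cons, List.foldl_nil] at *
    rw [ih]

-- indicator fold over events = count over the flattened inserted keys
lemma inner_count (es : List (Int × Int)) (q : Int) :
    es.foldl (fun s va => s + (if va.1 == q then (1 : Int) else 0)
                            + (if PySem.Int.bxor va.1 va.2 == q then (1 : Int) else 0)) 0
      = ((chocKeys es).count q : Int) := by
  induction es using List.reverseRecOn with
  | nil => simp [chocKeys]
  | append_singleton es e ih =>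
    rw [List.foldl_append]
    simp only [List.foldl_cons, List.foldl_nil, ih, chocKeys, List.flatMap_append,
      List.flatMap_cons, List.flatMap_nil, List.count_append]
    simp [List.count_cons, beq_iff_eq]
    by_cases h1 : e.1 = q <;> by_cases h2 : PySem.Int.bxor e.1 e.2 = q <;>
      simp [h1, h2] <;> ring

-- the online count fold computed offline: initial dict queried directly, earlier events
-- contributing by count
lemma count_offline (es : List (Int × Int)) (L : Int) (d : PySem.Dict Int Int) :
    (es.foldl chocCountStep (L, d)).1
      = L + (PySem.List.enumerate es 0).foldl
              (fun acc kq =>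
                acc + d.getD kq.2.1 0
                    + (PySem.List.slice es none (some kq.1)).foldl
                        (fun s va => s + (if va.1 == kq.2.1 then (1 : Int) else 0)
                                       + (if PySem.Int.bxor va.1 va.2 == kq.2.1 then (1 : Int) else 0)) 0) 0 := by
  induction es using List.reverseRecOn with
  | nil => simp [PySem.List.enumerate_nil]
  | append_singleton es e ih =>
    rw [List.foldl_append, PySem.List.enumerate_append]
    simp only [List.foldl_cons, List.foldl_nil, chocCountStep]
    have hd : (es.foldl chocCountStep (L, d)).2
        = (chocKeys es).foldl (fun d k => d.modify k 0 (· + 1)) d := count_dict es L d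
    -- the appended query's slice is exactly es
    have hslice : PySem.List.slice (es ++ [e]) none (some ((0 : Int) + es.length)) = es := by
      have : ((0 : Int) + es.length) = ((es.length : Nat) : Int) := by omega
      rw [this, PySem.List.slice_to_natCast]
      simp
    -- earlier queries' slices are unchanged by the append
    have hcongr : (PySem.List.enumerate es 0).foldl
            (fun acc kq =>
              acc + d.getD kq.2.1 0
                  + (PySem.List.slice (es ++ [e]) none (some kq.1)).foldl
                      (fun s va => s + (if va.1 == kq.2.1 then (1 : Int) else 0)
                                     + (if PySem.Int.bxor va.1 va.2 == kq.2.1 then (1 : Int) else 0)) 0) 0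
        = (PySem.List.enumerate es 0).foldl
            (fun acc kq =>
              acc + d.getD kq.2.1 0
                  + (PySem.List.slice es none (some kq.1)).foldl
                      (fun s va => s + (if va.1 == kq.2.1 then (1 : Int) else 0)
                                     + (if PySem.Int.bxor va.1 va.2 == kq.2.1 then (1 : Int) else 0)) 0) 0 := by
      apply PySem.List.foldl_congr_mem
      intro acc kq hmem
      obtain ⟨k, hk, rfl⟩ := (PySem.List.mem_enumerate_iff _ _ _).mp hmem
      have : ((0 : Int) + k) = ((k : Nat) : Int) := by omega
      rw [this, PySem.List.slice_to_natCast, PySem.List.slice_to_natCast,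
        List.take_append_of_le_length (by omega)]
    rw [ih, List.foldl_append, hcongr]
    simp only [PySem.List.enumerate_cons, PySem.List.enumerate_nil, List.foldl_cons,
      List.foldl_nil]
    rw [hslice, hd, PySem.Dict.getD_foldl_modify_add_one, inner_count]
    ring

-- initial dicts queried = membership in the initial key sets
lemma init0_getD (first q : Int) :
    ((PySem.Dict.empty.insert 0 1).insert first (1 : Int)).getD q 0
      = if PySem.Set.contains (PySem.Set.ofList [0, first]) q then (1 : Int) else 0 := by
  by_cases h1 : q = first <;> by_cases h2 : q = 0 <;>
    simp [PySem.Dict.getD_insert, PySem.Set.ofList, PySem.Set.contains, PySem.Set.add,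
      PySem.Set.empty, h1, h2] <;> (try split_ifs) <;> simp_all [eq_comm]

lemma init1_getD (q : Int) :
    (PySem.Dict.empty.insert 0 (1 : Int)).getD q 0
      = if PySem.Set.contains (PySem.Set.ofList [(0 : Int)]) q then (1 : Int) else 0 := by
  by_cases h : q = 0 <;>
    simp [PySem.Dict.getD_insert, PySem.Set.ofList, PySem.Set.contains, PySem.Set.add,
      PySem.Set.empty, h]

-- ===== VERDICT (by name: the statement is the Claim_ definition above) =====
theorem chocolateGame_spec : Claim_equal_chocolateGame := by
  intro arr _ hpre
  unfold Spec_chocolateGame chocolateGame chocolateGame_alt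
  match arr, hpre with
  | first :: rest, _ =>
    simp only []
    rw [simA]
    simp only []
    rw [PySem.List.slice_from_one]
    simp only [List.tail_cons]
    have hb := bridgeB rest 0 first first 0
    simp only [Nat.cast_zero, Nat.zero_mod, decide_true] at hb
    rw [count_offline, count_offline, hb.1, hb.2]
    unfold chocMatchB
    simp only [init0_getD, init1_getD]
    ring
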